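-- pv_equiv track=rewrite | github.com/LittleDan9/markdown-manager | services/backend/app/core/github_security.py | validate_github_username
-- ===== SOURCE A (Python) =====
-- def validate_github_username(username: str) -> bool:
--     """Validate GitHub username format."""
--     if not username:
--         return False
--
--     # GitHub username rules:
--     # - May only contain alphanumeric characters or single hyphens
--     # - Cannot begin or end with a hyphen
--     # - Maximum is 39 characters
--
--     if len(username) > 39:
--         return False
--
--     if username.startswith('-') or username.endswith('-'):
--         return False
--
--     # Check for consecutive hyphens
--     if '--' in username:
--         return False
--
--     # Check characters
--     for char in username:
--         if not (char.isalnum() or char == '-'):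
--             return False
--
--     return True
-- ===== SOURCE B (Python) =====
-- def validate_github_username(username: str) -> bool:
--     """Validate GitHub username format."""
--     if not username:
--         return False
--     if len(username) > 39:
--         return False
--     return all(p.isalnum() for p in username.split('-'))
-- ===== Notes on version B (the rewrite author's own statement) =====
-- stated objective: simpler
-- what changed: Replaces A's character scan plus three substring checks (leading/trailing/doubled hyphen) with a single split on the hyphen separator followed by a per-segment isalnum check, since an empty segment arises exactly at a boundary or doubled hyphen.
import Mathlib
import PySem

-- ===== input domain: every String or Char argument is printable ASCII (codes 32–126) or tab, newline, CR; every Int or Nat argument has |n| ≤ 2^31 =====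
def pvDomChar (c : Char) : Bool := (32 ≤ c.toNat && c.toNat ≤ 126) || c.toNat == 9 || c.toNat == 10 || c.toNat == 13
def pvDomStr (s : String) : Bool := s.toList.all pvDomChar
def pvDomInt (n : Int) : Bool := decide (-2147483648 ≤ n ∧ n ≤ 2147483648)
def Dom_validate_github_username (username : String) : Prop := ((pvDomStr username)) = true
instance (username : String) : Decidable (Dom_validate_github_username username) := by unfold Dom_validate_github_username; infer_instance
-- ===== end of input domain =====

-- ===== PORT A =====
-- B changes the traversal: instead of A's char-scan plus three substring checks, B splits on '-' and
-- checks each segment with isalnum (objective: simpler decomposition; no speed claim).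
def validate_github_username (username : String) : Bool :=
  if PySem.Str.len username = 0 then false
  else if 39 < PySem.Str.len username then false
  else if PySem.Str.startswith username "-" || PySem.Str.endswith username "-" then false
  else if PySem.Str.isIn "--" username then false
  else username.toList.all (fun c => PySem.Chars.isalnum c || c == '-')

-- ===== PORT B =====
def validate_github_username_alt (username : String) : Bool :=
  if PySem.Str.len username = 0 then false
  else if 39 < PySem.Str.len username then false
  else (PySem.Chars.splitOn username.toList ['-']).all (fun p => PySem.Chars.strIsalnum p)

-- ===== PRECONDITION & SPEC =====
def Spec_validate_github_username (username : String) (out : Bool) : Prop := out = validate_github_username_alt username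
instance (username : String) (out : Bool) : Decidable (Spec_validate_github_username username out) := by unfold Spec_validate_github_username; infer_instance

-- ===== CLAIM (what is proved, stated in full; the proofs are below) =====
def Claim_equal_validate_github_username : Prop := ∀ (username : String), Dom_validate_github_username username → Spec_validate_github_username username (validate_github_username username)

-- ===== LEMMAS AND PROOFS =====

-- prepend a partial segment onto the first piece of a segment list
def consH (p : List Char) : List (List Char) → List (List Char)
  | [] => [p]
  | x :: xs => (p ++ x) :: xs

-- simple structural splitter on '-' (the spine of PySem.Chars.splitOn for this separator)
def splitHy : List Char → List (List Char)
  | [] => [[]]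
  | c :: rest => if c = '-' then [] :: splitHy rest else consH [c] (splitHy rest)

-- segment checker: flag true = a fresh segment must start here, false = inside a segment
def chk : Bool → List Char → Bool
  | b, [] => !b
  | true, c :: rest => PySem.Chars.isalnum c && chk false rest
  | false, c :: rest => if c = '-' then chk true rest else PySem.Chars.isalnum c && chk false rest

lemma consH_consH (a b : List Char) (ys : List (List Char)) :
    consH a (consH b ys) = consH (a ++ b) ys := by
  cases ys <;> simp [consH]

lemma splitHy_ne_nil (cs : List Char) : splitHy cs ≠ [] := by
  cases cs with
  | nil => simp [splitHy]
  | cons c rest =>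
    by_cases h : c = '-'
    · simp [splitHy, h]
    · simp only [splitHy, h, if_false]
      cases splitHy rest <;> simp [consH]

lemma consH_nil (ys : List (List Char)) (h : ys ≠ []) : consH [] ys = ys := by
  cases ys with
  | nil => exact absurd rfl h
  | cons x xs => simp [consH]

lemma go_eq (fuel : Nat) (l cur : List Char) (acc : List (List Char)) (h : l.length < fuel) :
    PySem.Chars.splitOn.go ['-'] fuel l cur acc = acc.reverse ++ consH cur.reverse (splitHy l) := by
  induction fuel generalizing l cur acc with
  | zero => omega
  | succ fuel ih =>
    cases l with
    | nil => simp [PySem.Chars.splitOn.go, splitHy, consH]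
    | cons c rest =>
      by_cases hc : c = '-'
      · subst hc
        have hgo : PySem.Chars.splitOn.go ['-'] (fuel+1) ('-'::rest) cur acc
            = PySem.Chars.splitOn.go ['-'] fuel rest [] (cur.reverse :: acc) := by
          simp [PySem.Chars.splitOn.go]
        rw [hgo, ih rest [] (cur.reverse :: acc) (by simpa using Nat.lt_of_succ_lt_succ h)]
        simp only [List.reverse_nil, consH_nil _ (splitHy_ne_nil rest)]
        simp [splitHy, consH]
      · have hp : ¬ (['-'].isPrefixOf (c::rest) = true) := by
          simp [List.isPrefixOf]
          exact fun hh => hc hh.symm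
        have hgo : PySem.Chars.splitOn.go ['-'] (fuel+1) (c::rest) cur acc
            = PySem.Chars.splitOn.go ['-'] fuel rest (c :: cur) acc := by
          simp [PySem.Chars.splitOn.go, hp]
        rw [hgo, ih rest (c :: cur) acc (by simpa using Nat.lt_of_succ_lt_succ h)]
        simp [splitHy, hc, consH_consH]

lemma splitOn_eq (cs : List Char) : PySem.Chars.splitOn cs ['-'] = splitHy cs := by
  unfold PySem.Chars.splitOn
  rw [go_eq (cs.length + 1) cs [] [] (by omega)]
  simp [consH_nil _ (splitHy_ne_nil cs)]

lemma empty_not_alnum : PySem.Chars.strIsalnum ([] : List Char) = false := by decide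

lemma hyphen_not_alnum : PySem.Chars.isalnum '-' = false := by decide

lemma all_splitHy (cs : List Char) :
    ((splitHy cs).all PySem.Chars.strIsalnum = chk true cs)
    ∧ (((splitHy cs).headI.all PySem.Chars.isalnum && (splitHy cs).tail.all PySem.Chars.strIsalnum)
        = chk false cs) := by
  induction cs with
  | nil => simp [splitHy, chk, empty_not_alnum]
  | cons c rest ih =>
    obtain ⟨ih1, ih2⟩ := ih
    by_cases hc : c = '-'
    · subst hc
      refine ⟨?_, ?_⟩
      · simp [splitHy, chk, empty_not_alnum, hyphen_not_alnum]
      · have hsp : splitHy ('-'::rest) = [] :: splitHy rest := by simp [splitHy]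
        rw [hsp]
        simp only [List.headI, List.tail_cons, List.all_nil, Bool.true_and]
        rw [ih1]
        simp [chk]
    · obtain ⟨y, ys, hys⟩ : ∃ y ys, splitHy rest = y :: ys := by
        cases hq : splitHy rest with
        | nil => exact absurd hq (splitHy_ne_nil rest)
        | cons y ys => exact ⟨y, ys, rfl⟩
      rw [hys] at ih1 ih2
      simp only [List.headI, List.tail_cons] at ih2
      refine ⟨?_, ?_⟩
      · simp only [splitHy, hc, if_false, hys, consH, List.singleton_append, List.all_cons,
          PySem.Chars.strIsalnum, List.isEmpty_cons, Bool.not_false, Bool.true_and, chk,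
          Bool.and_assoc]
        rw [← ih2]
      · simp only [splitHy, hc, if_false, hys, consH, List.singleton_append, List.headI,
          List.tail_cons, List.all_cons, chk, Bool.and_assoc]
        rw [← ih2]

-- the character-level conditions A checks, as one Prop
def CondF (cs : List Char) : Prop :=
  ¬ ['-','-'] <:+: cs ∧ ¬ ['-'] <:+ cs ∧ ∀ c ∈ cs, (PySem.Chars.isalnum c || c == '-') = true

lemma head_prefix (t : List Char) : ['-'] <+: t ↔ t.head? = some '-' := by
  cases t with
  | nil => simp
  | cons a t' => simp [List.cons_prefix_cons, eq_comm]

lemma chk_iff (cs : List Char) :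
    (chk true cs = true ↔ cs ≠ [] ∧ ¬ ['-'] <+: cs ∧ CondF cs)
    ∧ (chk false cs = true ↔ CondF cs) := by
  induction cs with
  | nil =>
    refine ⟨by simp [chk], by simp [chk, CondF]⟩
  | cons c rest ih =>
    obtain ⟨ih1, ih2⟩ := ih
    by_cases hc : c = '-'
    · subst hc
      have hdd_iff : ['-','-'] <:+: ('-'::rest) ↔ (['-'] <+: rest ∨ ['-','-'] <:+: rest) := by
        rw [List.infix_cons_iff, List.cons_prefix_cons]
        simp
      have hsuf_iff : ['-'] <:+ ('-'::rest) ↔ (rest = [] ∨ ['-'] <:+ rest) := by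
        rw [List.suffix_cons_iff]
        simp [eq_comm]
      have hall_iff : (∀ x ∈ '-'::rest, (PySem.Chars.isalnum x || x == '-') = true)
          ↔ (∀ x ∈ rest, (PySem.Chars.isalnum x || x == '-') = true) := by
        rw [List.forall_mem_cons]
        simp
      have hcond : CondF ('-'::rest) ↔ (rest ≠ [] ∧ ¬ ['-'] <+: rest ∧ CondF rest) := by
        unfold CondF
        rw [hdd_iff, hsuf_iff, hall_iff]
        tauto
      refine ⟨?_, ?_⟩
      · have hl : chk true ('-'::rest) = false := by simp [chk, hyphen_not_alnum]
        rw [hl]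
        simp only [Bool.false_eq_true, false_iff]
        rintro ⟨_, hp, _⟩
        exact hp ((head_prefix _).mpr rfl)
      · have hl : chk false ('-'::rest) = chk true rest := by simp [chk]
        rw [hl, ih1, hcond]
    · have hne : ('-' : Char) ≠ c := fun h => hc h.symm
      have hdd_iff : ['-','-'] <:+: (c::rest) ↔ ['-','-'] <:+: rest := by
        rw [List.infix_cons_iff, List.cons_prefix_cons]
        simp [hne]
      have hsuf_iff : ['-'] <:+ (c::rest) ↔ ['-'] <:+ rest := by
        rw [List.suffix_cons_iff]
        have h1 : ¬ ((['-'] : List Char) = c :: rest) := by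
          intro h
          injection h with ha _
          exact hne ha
        simp [h1]
      have hall_iff : (∀ x ∈ c::rest, (PySem.Chars.isalnum x || x == '-') = true)
          ↔ (PySem.Chars.isalnum c = true ∧ ∀ x ∈ rest, (PySem.Chars.isalnum x || x == '-') = true) := by
        rw [List.forall_mem_cons]
        simp [hc]
      have hstep : CondF (c::rest) ↔ (PySem.Chars.isalnum c = true ∧ CondF rest) := by
        unfold CondF
        rw [hdd_iff, hsuf_iff, hall_iff]
        tauto
      have hhd : ¬ ['-'] <+: (c::rest) := by
        rw [head_prefix]
        simp [hc]
      refine ⟨?_, ?_⟩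
      · have hl : chk true (c::rest) = (PySem.Chars.isalnum c && chk false rest) := by simp [chk]
        rw [hl]
        simp only [Bool.and_eq_true, ih2, hstep]
        refine ⟨fun ⟨h1, h2⟩ => ⟨by simp, hhd, h1, h2⟩, fun ⟨_, _, h3, h4⟩ => ⟨h3, h4⟩⟩
      · have hl : chk false (c::rest) = (PySem.Chars.isalnum c && chk false rest) := by
          simp [chk, hc]
        rw [hl]
        simp only [Bool.and_eq_true, ih2, hstep]

-- ===== VERDICT (by name: the statement is the Claim_ definition above) =====
theorem validate_github_username_spec : Claim_equal_validate_github_username := by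
  intro username _
  unfold Spec_validate_github_username validate_github_username validate_github_username_alt
  by_cases h0 : PySem.Str.len username = 0
  · rw [if_pos h0, if_pos h0]
  · rw [if_neg h0, if_neg h0]
    by_cases h39 : 39 < PySem.Str.len username
    · rw [if_pos h39, if_pos h39]
    · rw [if_neg h39, if_neg h39]
      rw [splitOn_eq, (all_splitHy username.toList).1]
      have hne : username.toList ≠ [] := by
        intro h
        apply h0
        rw [PySem.Str.len_eq, h]
        rfl
      have hA : (chk true username.toList = true) ↔
          (¬ ['-'] <+: username.toList ∧ CondF username.toList) := by
        rw [(chk_iff username.toList).1]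
        exact ⟨fun ⟨_, a, b⟩ => ⟨a, b⟩, fun ⟨a, b⟩ => ⟨hne, a, b⟩⟩
      by_cases hstart : ['-'] <+: username.toList ∨ ['-'] <:+ username.toList
      · have hsw : (PySem.Str.startswith username "-" || PySem.Str.endswith username "-") = true := by
          rw [Bool.or_eq_true, PySem.Str.startswith_eq, PySem.Str.endswith_eq]
          rcases hstart with h | h
          · exact Or.inl ((PySem.Chars.startswith_iff _ _).mpr (by simpa using h))
          · exact Or.inr ((PySem.Chars.endswith_iff _ _).mpr (by simpa using h))
        rw [hsw, if_pos rfl]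
        cases hch : chk true username.toList
        · rfl
        · exfalso
          rcases hA.mp hch with ⟨ha, _, hb, _⟩
          rcases hstart with h | h
          · exact ha h
          · exact hb h
      · rw [not_or] at hstart
        have hsw : (PySem.Str.startswith username "-" || PySem.Str.endswith username "-") = false := by
          rw [Bool.or_eq_false_iff, PySem.Str.startswith_eq, PySem.Str.endswith_eq]
          constructor
          · cases hq : PySem.Chars.startswith username.toList "-".toList
            · rfl
            · exact absurd (by simpa using (PySem.Chars.startswith_iff _ _).mp hq) hstart.1
          · cases hq : PySem.Chars.endswith username.toList "-".toList
            · rfl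
            · exact absurd (by simpa using (PySem.Chars.endswith_iff _ _).mp hq) hstart.2
        rw [hsw]
        rw [if_neg (by simp)]
        by_cases hdd : ['-','-'] <:+: username.toList
        · have hin : PySem.Str.isIn "--" username = true := by
            rw [PySem.Str.isIn_iff_infix]
            simpa using hdd
          rw [hin, if_pos rfl]
          cases hch : chk true username.toList
          · rfl
          · exact absurd (hA.mp hch).2.1 (fun h => h hdd)
        · have hin : PySem.Str.isIn "--" username = false := by
            cases hq : PySem.Str.isIn "--" username
            · rfl
            · exact absurd (by simpa using (PySem.Str.isIn_iff_infix _ _).mp hq) hdd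
          rw [hin, if_neg (by simp)]
          cases hch : chk true username.toList
          · cases hall : username.toList.all (fun c => PySem.Chars.isalnum c || c == '-')
            · rfl
            · exfalso
              have hc : chk true username.toList = true :=
                hA.mpr ⟨hstart.1, hdd, hstart.2, by simpa [List.all_eq_true] using hall⟩
              rw [hch] at hc
              exact Bool.false_ne_true hc
          · rcases hA.mp hch with ⟨_, _, _, hall⟩
            simp only [List.all_eq_true]
            exact fun c hcmem => hall c hcmem
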